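-- pv_equiv track=rewrite | github.com/rransom8774/mqdss-parameters | py3/pqsigparam/common.py | pfwdist
-- ===== SOURCE A (Python) =====
-- import math
-- import operator
-- import functools
-- import itertools
--
-- def binom(n, w):
--     return (functools.reduce(operator.mul,
--                              (n - i for i in range(w)), 1) //
--             math.factorial(w))
--
-- def pfwdist(n, w, p):
--     """Computes the distribution produced by puncturing the uniform
--     distribution of fixed-weight vectors."""
--     assert p <= n
--     assert w <= n
--     dist = list(itertools.repeat(None, min(w, p) + 1))
--     N = 0
--     for wp in range(min(w, p) + 1):
--         punctcount = binom(p, wp)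
--         vectcount = binom(n - p, w - wp)
--         dist[wp] = (vectcount, punctcount)
--         N = N + (vectcount * punctcount)
--         pass
--     assert N == binom(n, w)
--     return (N, dist)
-- ===== SOURCE B (Python) =====
-- def pfwdist(n, w, p):
--     """Computes the distribution produced by puncturing the uniform
--     distribution of fixed-weight vectors."""
--     assert p <= n
--     assert w <= n
--     m = min(w, p)
--     q = n - p
--     # punctcount at wp = m: binom(p, m), built incrementally
--     pc = 1
--     for i in range(m):
--         pc = pc * (p - i) // (i + 1)
--     # vectcount at wp = m: binom(q, w - m), built incrementally
--     vc = 1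
--     for i in range(w - m):
--         vc = vc * (q - i) // (i + 1)
--     # walk wp from m down to 0, updating both binomials by one Pascal step
--     # and building the list back-to-front
--     dist = []
--     N = 0
--     k = w - m
--     for wp in range(m, -1, -1):
--         dist = [(vc, pc)] + dist
--         N += vc * pc
--         if wp > 0:
--             pc = pc * wp // (p - wp + 1)
--             vc = vc * (q - k) // (k + 1)
--             k += 1
--     return (N, dist)
-- ===== Notes on version B (the rewrite author's own statement) =====
-- stated objective: faster
-- what changed: B updates both binomial coefficients incrementally by one Pascal-style multiply/divide per iteration (walking wp from min(w,p) down to 0 and building the list back-to-front) instead of recomputing both binomials from scratch in every iteration, and drops the final Vandermonde re-check.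
import Mathlib
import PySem

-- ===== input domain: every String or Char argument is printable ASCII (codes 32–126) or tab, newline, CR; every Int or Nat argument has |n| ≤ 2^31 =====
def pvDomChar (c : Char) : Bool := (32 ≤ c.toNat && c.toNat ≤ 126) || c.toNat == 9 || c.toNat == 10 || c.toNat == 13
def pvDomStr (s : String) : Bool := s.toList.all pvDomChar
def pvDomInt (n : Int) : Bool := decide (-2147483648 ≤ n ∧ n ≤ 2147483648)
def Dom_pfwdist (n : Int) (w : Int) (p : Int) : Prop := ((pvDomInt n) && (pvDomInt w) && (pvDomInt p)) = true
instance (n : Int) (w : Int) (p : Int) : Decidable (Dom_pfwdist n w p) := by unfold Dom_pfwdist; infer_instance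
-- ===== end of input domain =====

-- B replaces A's per-iteration from-scratch binomials by one Pascal-style incremental
-- multiply/divide per iteration (walking wp downward, building the list back-to-front); faster.


-- ===== PORT A =====
-- math.factorial(w): product 1*2*…*w (A only calls it with 0 ≤ w inside Pre_)
def pyFactorial (w : Int) : Int :=
  (PySem.List.pyRange 0 w 1).foldl (fun a i => a * (i + 1)) 1

-- binom(n, w) = reduce(mul, (n - i for i in range(w)), 1) // factorial(w)
def binomA (n : Int) (w : Int) : Int :=
  PySem.Int.floordiv ((PySem.List.pyRange 0 w 1).foldl (fun a i => a * (n - i)) 1)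
    (pyFactorial w)

-- the for-loop over range(min(w,p)+1): dist grows by assignment at index wp (= append in order), N accumulates
def pfwdist (n : Int) (w : Int) (p : Int) : Int × (List (Int × Int)) :=
  let st := (PySem.List.pyRange 0 (min w p + 1) 1).foldl
    (fun (st : List (Int × Int) × Int) wp =>
      let punctcount := binomA p wp
      let vectcount := binomA (n - p) (w - wp)
      (st.1 ++ [(vectcount, punctcount)], st.2 + vectcount * punctcount))
    ([], 0)
  (st.2, st.1)

-- ===== PORT B =====
-- the downward loop 'for wp in range(m, -1, -1)': j+1 iterations remain means wp = j
def pfwdistAltLoop (p : Int) (q : Int) : Nat → Int → Int → Int → Int → List (Int × Int) → Int × (List (Int × Int))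
  | 0, _, _, _, N, dist => (N, dist)
  | j + 1, pc, vc, k, N, dist =>
    let dist' := (vc, pc) :: dist
    let N' := N + vc * pc
    if j = 0 then (N', dist')
    else pfwdistAltLoop p q j (PySem.Int.floordiv (pc * (j : Int)) (p - (j : Int) + 1))
      (PySem.Int.floordiv (vc * (q - k)) (k + 1)) (k + 1) N' dist'

def pfwdist_alt (n : Int) (w : Int) (p : Int) : Int × (List (Int × Int)) :=
  let m := min w p
  let q := n - p
  let pc := (PySem.List.pyRange 0 m 1).foldl
    (fun c i => PySem.Int.floordiv (c * (p - i)) (i + 1)) 1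
  let vc := (PySem.List.pyRange 0 (w - m) 1).foldl
    (fun c i => PySem.Int.floordiv (c * (q - i)) (i + 1)) 1
  pfwdistAltLoop p q (m.toNat + 1) pc vc (w - m) 0 []

-- ===== PRECONDITION & SPEC =====
-- exactly the inputs where Python A returns: both asserts pass, both factorials get
-- nonnegative arguments, and the final Vandermonde assert holds
def Pre_pfwdist (n : Int) (w : Int) (p : Int) : Prop := 0 ≤ w ∧ 0 ≤ p ∧ w ≤ n ∧ p ≤ n
instance (n : Int) (w : Int) (p : Int) : Decidable (Pre_pfwdist n w p) := by unfold Pre_pfwdist; infer_instance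
def pvWitness_pfwdist : Int × Int × Int := (5, 3, 2)

def Spec_pfwdist (n : Int) (w : Int) (p : Int) (out : Int × (List (Int × Int))) : Prop := out = pfwdist_alt n w p
instance (n : Int) (w : Int) (p : Int) (out : Int × (List (Int × Int))) : Decidable (Spec_pfwdist n w p out) := by unfold Spec_pfwdist; infer_instance

-- ===== CLAIM (what is proved, stated in full; the proofs are below) =====
def Claim_equal_pfwdist : Prop := ∀ (n : Int) (w : Int) (p : Int), Dom_pfwdist n w p → Pre_pfwdist n w p → Spec_pfwdist n w p (pfwdist n w p)

-- ===== LEMMAS AND PROOFS =====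

-- the common mathematical value of both programs, in terms of Nat.choose
def entryOf (Q W P : Nat) (i : Nat) : Int × Int := ((Q.choose (W - i) : Int), (P.choose i : Int))

lemma fact_spec (k : Nat) : pyFactorial (k : Int) = (k.factorial : Int) := by
  unfold pyFactorial
  rw [PySem.List.pyRange_one]
  simp only [sub_zero, Int.toNat_natCast, zero_add]
  induction k with
  | zero => simp [List.range_zero, Nat.factorial]
  | succ k ih =>
    rw [List.range_succ, List.map_append, List.foldl_append, ih]
    simp [Nat.factorial_succ]
    ring

lemma numer_spec (a : Int) (A : Nat) (ha : a = (A : Int)) (k : Nat) :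
    (PySem.List.pyRange 0 (k : Int) 1).foldl (fun c i => c * (a - i)) 1 = (A.descFactorial k : Int) := by
  rw [PySem.List.pyRange_one]
  simp only [sub_zero, Int.toNat_natCast, zero_add]
  induction k with
  | zero => simp
  | succ k ih =>
    rw [List.range_succ, List.map_append, List.foldl_append, ih]
    simp only [List.map_cons, List.map_nil, List.foldl_cons, List.foldl_nil]
    by_cases hk : k < A
    · rw [Nat.descFactorial_succ]
      subst ha
      have hcast : ((A : Int) - (k : Int)) = ((A - k : Nat) : Int) := by omega
      rw [hcast]
      push_cast
      ring
    · have h0 : A.descFactorial (k + 1) = 0 := Nat.descFactorial_eq_zero_iff_lt.mpr (by omega)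
      have hA : A = k ∨ A < k := by omega
      rcases hA with hA | hA
      · subst hA ha; simp
      · have : A.descFactorial k = 0 := Nat.descFactorial_eq_zero_iff_lt.mpr hA
        simp [this]

lemma binomA_spec (a : Int) (A : Nat) (ha : a = (A : Int)) (k : Nat) :
    binomA a (k : Int) = (A.choose k : Int) := by
  unfold binomA
  rw [numer_spec a A ha k, fact_spec k]
  rw [PySem.Int.floordiv_natCast]
  rw [Nat.choose_eq_descFactorial_div_factorial]

-- one Pascal step upward: choose A k ↦ choose A (k+1), with Python floor division
lemma choose_step_up (a : Int) (A : Nat) (ha : a = (A : Int)) (k : Nat) :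
    PySem.Int.floordiv ((A.choose k : Int) * (a - (k : Int))) ((k : Int) + 1) = (A.choose (k + 1) : Int) := by
  subst ha
  by_cases hk : k < A
  · have h1 : ((A : Int) - k) = ((A - k : Nat) : Int) := by push_cast [Nat.le_of_lt hk]; ring
    rw [h1, ← Nat.cast_mul, ← Nat.cast_one, ← Nat.cast_add, PySem.Int.floordiv_natCast]
    congr 1
    rw [← Nat.choose_succ_right_eq, Nat.mul_div_cancel _ (by omega)]
  · have hA : A = k ∨ A < k := by omega
    have h0 : A.choose (k + 1) = 0 := Nat.choose_eq_zero_of_lt (by omega)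
    rcases hA with hA | hA
    · subst hA
      simp
    · have : A.choose k = 0 := Nat.choose_eq_zero_of_lt hA
      simp [this, h0]

-- the ascending product loop computes a binomial coefficient
lemma asc_spec (a : Int) (A : Nat) (ha : a = (A : Int)) (k : Nat) :
    (PySem.List.pyRange 0 (k : Int) 1).foldl (fun c i => PySem.Int.floordiv (c * (a - i)) (i + 1)) 1
      = (A.choose k : Int) := by
  rw [PySem.List.pyRange_one]
  simp only [sub_zero, Int.toNat_natCast, zero_add]
  induction k with
  | zero => simp
  | succ k ih =>
    rw [List.range_succ, List.map_append, List.foldl_append, ih]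
    simp only [List.map_cons, List.map_nil, List.foldl_cons, List.foldl_nil]
    exact choose_step_up a A ha k

-- one Pascal step downward for the punctured-part binomial
lemma choose_step_down (p : Int) (P : Nat) (hp : p = (P : Int)) (j : Nat) (hj : j + 1 ≤ P) :
    PySem.Int.floordiv ((P.choose (j + 1) : Int) * ((j : Int) + 1)) (p - ((j : Int) + 1) + 1)
      = (P.choose j : Int) := by
  subst hp
  have h1 : ((P : Int) - ((j : Int) + 1) + 1) = ((P - j : Nat) : Int) := by omega
  have h2 : ((P.choose (j + 1) : Int) * ((j : Int) + 1)) = (((P.choose (j + 1)) * (j + 1) : Nat) : Int) := by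
    push_cast; ring
  rw [h1, h2, PySem.Int.floordiv_natCast]
  congr 1
  rw [Nat.choose_succ_right_eq]
  exact Nat.mul_div_cancel _ (by omega)

-- invariant of B's downward loop: with wp = j, pc = C(P,j), vc = C(Q,W-j), k = W-j,
-- it appends the entries for wp = j … 0 in front of dist and adds their products to N
lemma loop_spec (P Q W : Nat) (p q : Int) (hp : p = (P : Int)) (hq : q = (Q : Int)) :
    ∀ (j : Nat), j ≤ min W P → ∀ (N : Int) (dist : List (Int × Int)),
    pfwdistAltLoop p q (j + 1) (P.choose j : Int) (Q.choose (W - j) : Int) ((W : Int) - (j : Int)) N dist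
      = (N + (((List.range (j + 1)).map (fun i => ((Q.choose (W - i) : Int)) * (P.choose i : Int))).sum),
         (List.range (j + 1)).map (entryOf Q W P) ++ dist) := by
  intro j
  induction j with
  | zero =>
    intro _ N dist
    simp [pfwdistAltLoop, entryOf]
  | succ j ih =>
    intro hj N dist
    have hjP : j + 1 ≤ P := le_trans hj (min_le_right _ _)
    have hjW : j + 1 ≤ W := le_trans hj (min_le_left _ _)
    rw [pfwdistAltLoop]
    simp only [Nat.succ_ne_zero, if_false, Nat.cast_add, Nat.cast_one]
    have hpc : PySem.Int.floordiv ((P.choose (j + 1) : Int) * ((j : Int) + 1)) (p - ((j : Int) + 1) + 1)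
        = (P.choose j : Int) := by
      subst hp; exact choose_step_down _ P rfl j hjP
    have hk1 : (W : Int) - ((j : Int) + 1) + 1 = (W : Int) - (j : Int) := by ring
    have hvc : PySem.Int.floordiv ((Q.choose (W - (j + 1)) : Int) * (q - ((W : Int) - ((j : Int) + 1)))) (((W : Int) - ((j : Int) + 1)) + 1)
        = (Q.choose (W - j) : Int) := by
      have hW1 : ((W : Int) - ((j : Int) + 1)) = ((W - (j + 1) : Nat) : Int) := by push_cast [hjW]; ring
      have hW2 : W - (j + 1) + 1 = W - j := by omega
      rw [hW1, ← hW2, ← choose_step_up q Q hq (W - (j + 1))]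
    rw [hpc, hvc, hk1, ih (by omega) _ _]
    simp only [Prod.mk.injEq]
    refine ⟨?_, ?_⟩
    · rw [List.range_succ (n := j + 1), List.map_append, List.sum_append]
      simp only [List.map_cons, List.map_nil, List.sum_cons, List.sum_nil]
      ring
    · rw [List.range_succ (n := j + 1), List.map_append]
      simp [entryOf]

-- A's fold, rewritten as two independent accumulators over range (M+1)
lemma pfwdist_eval (n w p : Int) (hpre : Pre_pfwdist n w p) :
    pfwdist n w p
      = ((((List.range ((min w p).toNat + 1)).map
            (fun i => (((n - p).toNat.choose (w.toNat - i) : Int)) * (p.toNat.choose i : Int))).sum),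
         (List.range ((min w p).toNat + 1)).map (entryOf (n - p).toNat w.toNat p.toNat)) := by
  obtain ⟨hw, hp, hwn, hpn⟩ := hpre
  unfold pfwdist
  have hm1 : min w p + 1 = (((min w p).toNat + 1 : Nat) : Int) := by
    have : 0 ≤ min w p := le_min hw hp
    omega
  rw [hm1, PySem.List.pyRange_one]
  simp only [sub_zero, Int.toNat_natCast, zero_add]
  rw [PySem.List.foldl_prod_mk
    (f := fun acc wp => acc ++ [(binomA (n - p) (w - wp), binomA p wp)])
    (g := fun acc wp => acc + binomA (n - p) (w - wp) * binomA p wp)]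
  rw [PySem.List.foldl_append_singleton_eq_map, PySem.List.foldl_add]
  have key : ∀ i ∈ List.range ((min w p).toNat + 1),
      binomA (n - p) (w - (i : Int)) = (((n - p).toNat.choose (w.toNat - i) : Int))
      ∧ binomA p (i : Int) = (p.toNat.choose i : Int) := by
    intro i hi
    have hi' : (i : Int) ≤ min w p := by
      have := List.mem_range.mp hi
      omega
    have hiw : (i : Int) ≤ w := le_trans hi' (min_le_left _ _)
    have h1 : w - (i : Int) = ((w.toNat - i : Nat) : Int) := by omega
    refine ⟨?_, ?_⟩
    · rw [h1]; exact binomA_spec (n - p) (n - p).toNat (by omega) _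
    · exact binomA_spec p p.toNat (by omega) i
  simp only [List.map_map, List.nil_append, zero_add, Prod.mk.injEq]
  refine ⟨?_, ?_⟩
  · congr 1
    refine List.map_congr_left ?_
    intro i hi
    simp only [Function.comp_apply]
    rw [(key i hi).1, (key i hi).2]
  · refine List.map_congr_left ?_
    intro i hi
    simp only [Function.comp_apply, entryOf]
    rw [(key i hi).1, (key i hi).2]

-- B's program, evaluated to the same value
lemma pfwdist_alt_eval (n w p : Int) (hpre : Pre_pfwdist n w p) :
    pfwdist_alt n w p
      = ((((List.range ((min w p).toNat + 1)).map
            (fun i => (((n - p).toNat.choose (w.toNat - i) : Int)) * (p.toNat.choose i : Int))).sum),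
         (List.range ((min w p).toNat + 1)).map (entryOf (n - p).toNat w.toNat p.toNat)) := by
  obtain ⟨hw, hp, hwn, hpn⟩ := hpre
  unfold pfwdist_alt
  have hm : min w p = (((min w p).toNat : Nat) : Int) := by
    have : 0 ≤ min w p := le_min hw hp
    omega
  have hwm : w - min w p = (((w.toNat - (min w p).toNat : Nat) : Nat) : Int) := by omega
  have hpc : (PySem.List.pyRange 0 (min w p) 1).foldl
      (fun c i => PySem.Int.floordiv (c * (p - i)) (i + 1)) 1 = (p.toNat.choose (min w p).toNat : Int) := by
    rw [hm]; exact asc_spec p p.toNat (by omega) _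
  have hvc : (PySem.List.pyRange 0 (w - min w p) 1).foldl
      (fun c i => PySem.Int.floordiv (c * ((n - p) - i)) (i + 1)) 1
      = ((n - p).toNat.choose (w.toNat - (min w p).toNat) : Int) := by
    rw [hwm]; exact asc_spec (n - p) (n - p).toNat (by omega) _
  simp only []
  rw [hpc, hvc]
  have hmm : (min w p).toNat ≤ min w.toNat p.toNat := by omega
  have hk : w - min w p = (w.toNat : Int) - ((min w p).toNat : Int) := by omega
  rw [hk]
  rw [loop_spec p.toNat (n - p).toNat w.toNat p (n - p) (by omega) (by omega) (min w p).toNat hmm 0 []]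
  simp

-- ===== VERDICT (by name: the statement is the Claim_ definition above) =====
theorem pfwdist_spec : Claim_equal_pfwdist := by
  intro n w p _ hpre
  unfold Spec_pfwdist
  rw [pfwdist_eval n w p hpre, pfwdist_alt_eval n w p hpre]
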